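-- pv_equiv track=rewrite | github.com/BoryaBl/Godzinator | ui/utils/time_sum_helpers.py | sanitize_multiplier_text
-- ===== SOURCE A (Python) =====
-- def sanitize_multiplier_text(raw: str) -> str:
--     result: list[str] = []
--     separator_added = False
--
--     for character in raw:
--         if character.isdigit():
--             result.append(character)
--         elif character in ".," and not separator_added:
--             result.append(character)
--             separator_added = True
--
--     return "".join(result)
-- ===== SOURCE B (Python) =====
-- def sanitize_multiplier_text(raw: str) -> str:
--     idx = next((i for i, c in enumerate(raw) if c in ".,"), None)
--     if idx is None:
--         return "".join(c for c in raw if c.isdigit())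
--     head = "".join(c for c in raw[:idx] if c.isdigit())
--     tail = "".join(c for c in raw[idx + 1:] if c.isdigit())
--     return head + raw[idx] + tail
-- ===== Notes on version B (the rewrite author's own statement) =====
-- stated objective: alternative
-- what changed: Replaces the single stateful flag-driven scan with a partition around the first separator found via next/enumerate and two independent digit-filter passes over the head and tail.
import Mathlib
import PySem

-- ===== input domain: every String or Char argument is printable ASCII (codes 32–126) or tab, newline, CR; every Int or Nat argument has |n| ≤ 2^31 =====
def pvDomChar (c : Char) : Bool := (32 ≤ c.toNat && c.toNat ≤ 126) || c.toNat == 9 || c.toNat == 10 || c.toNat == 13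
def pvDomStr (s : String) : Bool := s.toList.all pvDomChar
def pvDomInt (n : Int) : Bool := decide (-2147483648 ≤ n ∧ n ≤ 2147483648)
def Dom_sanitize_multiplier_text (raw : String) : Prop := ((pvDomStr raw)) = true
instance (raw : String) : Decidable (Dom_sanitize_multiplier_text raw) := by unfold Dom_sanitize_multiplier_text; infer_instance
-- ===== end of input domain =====

-- B partitions around the first '.' or ',' and filters digits in two independent passes
-- instead of A's single flag-driven scan; objective: alternative decomposition, same cost.

-- ===== PORT A =====
-- A's loop step: append digits always; append '.' or ',' only while the flag is unset.
def pvStepA (st : List Char × Bool) (character : Char) : List Char × Bool :=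
  if PySem.Chars.isdigit character then (st.1 ++ [character], st.2)
  else if (character == '.' || character == ',') && !st.2 then (st.1 ++ [character], true)
  else st

def sanitize_multiplier_text (raw : String) : String :=
  String.mk (raw.toList.foldl pvStepA ([], false)).1

-- ===== PORT B =====
def sanitize_multiplier_text_alt (raw : String) : String :=
  let cs := raw.toList
  match cs.findIdx? (fun c => c == '.' || c == ',') with
  | none => String.mk (cs.filter PySem.Chars.isdigit)
  | some i =>
      String.mk ((cs.take i).filter PySem.Chars.isdigit
                 ++ [cs.getD i ' ']   -- raw[idx]; findIdx? guarantees i is in range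
                 ++ ((cs.drop (i + 1)).filter PySem.Chars.isdigit))

-- ===== PRECONDITION & SPEC =====
def Spec_sanitize_multiplier_text (raw : String) (out : String) : Prop := out = sanitize_multiplier_text_alt raw
instance (raw : String) (out : String) : Decidable (Spec_sanitize_multiplier_text raw out) := by unfold Spec_sanitize_multiplier_text; infer_instance

-- ===== CLAIM (what is proved, stated in full; the proofs are below) =====
def Claim_equal_sanitize_multiplier_text : Prop := ∀ (raw : String), Dom_sanitize_multiplier_text raw → Spec_sanitize_multiplier_text raw (sanitize_multiplier_text raw)

-- ===== LEMMAS AND PROOFS =====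

def pvSep (c : Char) : Bool := c == '.' || c == ','

-- B's result on a list of characters, used to relate the two ports.
def pvAltCore (cs : List Char) : List Char :=
  match cs.findIdx? pvSep with
  | none => cs.filter PySem.Chars.isdigit
  | some i => (cs.take i).filter PySem.Chars.isdigit
              ++ [cs.getD i ' ']
              ++ ((cs.drop (i + 1)).filter PySem.Chars.isdigit)

theorem pvAlt_eq (raw : String) :
    sanitize_multiplier_text_alt raw = String.mk (pvAltCore raw.toList) := by
  unfold sanitize_multiplier_text_alt pvAltCore
  rw [show (fun c => c == '.' || c == ',') = pvSep from rfl]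
  cases h : raw.toList.findIdx? pvSep <;> simp only [h]

theorem pvSep_not_digit (c : Char) (h : pvSep c = true) :
    PySem.Chars.isdigit c = false := by
  unfold pvSep at h
  rcases Bool.or_eq_true_iff.mp h with h' | h' <;>
    · simp only [beq_iff_eq] at h'; subst h'; decide

theorem pvFoldA_true (l : List Char) (acc : List Char) :
    l.foldl pvStepA (acc, true) = (acc ++ l.filter PySem.Chars.isdigit, true) := by
  induction l generalizing acc with
  | nil => simp
  | cons c l ih =>
    by_cases hd : PySem.Chars.isdigit c = true
    · simp [pvStepA, hd, ih]
    · simp at hd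
      simp [pvStepA, hd, ih]

theorem pvFoldA_false (l : List Char) (acc : List Char) :
    (l.foldl pvStepA (acc, false)).1 = acc ++ pvAltCore l := by
  induction l generalizing acc with
  | nil => simp [pvAltCore]
  | cons c l ih =>
    by_cases hd : PySem.Chars.isdigit c = true
    · have hs : pvSep c = false := by
        cases h : pvSep c
        · rfl
        · rw [pvSep_not_digit c h] at hd; exact absurd hd (by simp)
      have hcore : pvAltCore (c :: l) = c :: pvAltCore l := by
        unfold pvAltCore
        rw [List.findIdx?_cons]
        rw [if_neg (by simp [hs])]
        cases h : l.findIdx? pvSep with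
        | none => simp [hd]
        | some i => simp [hd, List.take_succ_cons, List.getD]
      rw [hcore]
      have hstep : pvStepA (acc, false) c = (acc ++ [c], false) := by
        simp [pvStepA, hd]
      rw [List.foldl_cons, hstep, ih]
      simp
    · simp at hd
      by_cases hs : pvSep c = true
      · have hcore : pvAltCore (c :: l) = c :: l.filter PySem.Chars.isdigit := by
          unfold pvAltCore
          rw [List.findIdx?_cons]
          rw [if_pos (by simp [hs])]
          simp [List.getD]
        rw [hcore]
        have hstep : pvStepA (acc, false) c = (acc ++ [c], true) := by
          unfold pvSep at hs
          simp [pvStepA, hd, hs]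
        rw [List.foldl_cons, hstep, pvFoldA_true]
        simp
      · simp only [Bool.not_eq_true] at hs
        have hcore : pvAltCore (c :: l) = pvAltCore l := by
          unfold pvAltCore
          rw [List.findIdx?_cons]
          rw [if_neg (by simp [hs])]
          cases h : l.findIdx? pvSep with
          | none => simp [hd]
          | some i => simp [hd, List.take_succ_cons, List.getD]
        rw [hcore]
        have hstep : pvStepA (acc, false) c = (acc, false) := by
          unfold pvSep at hs
          simp [pvStepA, hd, hs]
        rw [List.foldl_cons, hstep, ih]

-- ===== VERDICT (by name: the statement is the Claim_ definition above) =====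
theorem sanitize_multiplier_text_spec : Claim_equal_sanitize_multiplier_text := by
  intro raw _
  unfold Spec_sanitize_multiplier_text
  rw [pvAlt_eq]
  unfold sanitize_multiplier_text
  rw [pvFoldA_false]
  simp
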